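-- pv_equiv track=rewrite | github.com/0xDEADCODED/AdventOfCode | 2024/9/sol.py | done_moving
-- ===== SOURCE A (Python) =====
-- def done_moving(mem_map, c):
--     found_free_space = False
--     for i in range(c,len(mem_map)):
--         if mem_map[i] == '.' and not found_free_space:
--             found_free_space = True
--             continue
--
--         if found_free_space and mem_map[i] != '.':
--             return False
--
--     return True
-- ===== SOURCE B (Python) =====
-- def done_moving(mem_map, c):
--     sub = mem_map[c:]
--     if '.' not in sub:
--         return True
--     first = sub.index('.')
--     return all(x == '.' for x in sub[first:])
-- ===== Notes on version B (the rewrite author's own statement) =====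
-- stated objective: simpler
-- what changed: Replaces A's flag-carrying index loop with locate-the-boundary-then-check-the-tail: slice mem_map[c:], find the first '.', and check that everything after it is '.'.
-- outside the precondition, e.g. on done_moving(['a', 'a', '.', 'a'], -1): A returns False, B returns True; on done_moving(['a', '.', 'a'], -3): A returns False, B returns False; on done_moving([], -1): A raises IndexError, B returns True
import Mathlib
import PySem

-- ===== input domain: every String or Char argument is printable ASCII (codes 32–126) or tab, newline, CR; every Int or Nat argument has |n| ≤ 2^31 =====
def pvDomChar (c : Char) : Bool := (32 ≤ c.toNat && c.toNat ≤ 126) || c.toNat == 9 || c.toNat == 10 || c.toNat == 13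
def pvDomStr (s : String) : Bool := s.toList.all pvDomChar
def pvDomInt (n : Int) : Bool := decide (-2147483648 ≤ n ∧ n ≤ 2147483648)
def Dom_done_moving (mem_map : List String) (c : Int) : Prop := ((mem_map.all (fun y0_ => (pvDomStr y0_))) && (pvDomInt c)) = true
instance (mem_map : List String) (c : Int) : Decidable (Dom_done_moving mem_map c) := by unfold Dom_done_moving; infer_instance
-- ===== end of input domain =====

-- B locates the first free-space cell in mem_map[c:] and checks the tail after it is all
-- free space, instead of A's flag-carrying index loop; objective: simpler decomposition.

-- ===== PORT A =====
-- transliteration of A's for-loop over range(c, len(mem_map)) carrying found_free_space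
def doneMovingLoop (mem_map : List String) (idxs : List Int) (found : Bool) : Bool :=
  match idxs with
  | [] => true
  | i :: rest =>
    match PySem.List.pyGet? mem_map i with
    | none => true   -- IndexError in Python (c < -len); excluded by Pre_done_moving
    | some x =>
      if x == "." && !found then doneMovingLoop mem_map rest true
      else if found && !(x == ".") then false
      else doneMovingLoop mem_map rest found

def done_moving (mem_map : List String) (c : Int) : Bool :=
  doneMovingLoop mem_map (PySem.List.pyRange c (mem_map.length : Int) 1) false

-- ===== PORT B =====
-- tail check over sub = mem_map[c:]
def doneAltTail (sub : List String) : Bool :=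
  if !(sub.contains ".") then true
  else
    match PySem.List.index? sub "." with
    | none => true   -- unreachable: '.' is in sub
    | some first => (PySem.List.slice sub (some (first : Int)) none).all (fun x => x == ".")

def done_moving_alt (mem_map : List String) (c : Int) : Bool :=
  doneAltTail (PySem.List.slice mem_map (some c) none)

-- ===== PRECONDITION & SPEC =====
-- Pre_ excludes negative c, a corner no caller reaches (the puzzle drives c from 0 upward):
-- for c < -len A raises IndexError, and for -len ≤ c < 0 A's negative-index wraparound
-- (rescanning elements before c) and B's tail-slice reading are both defensible and no one
-- would specify either.
def Pre_done_moving (mem_map : List String) (c : Int) : Prop := 0 ≤ c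
instance (mem_map : List String) (c : Int) : Decidable (Pre_done_moving mem_map c) := by unfold Pre_done_moving; infer_instance
def pvWitness_done_moving : List String × Int := (["0", ".", ".", "1"], 1)

def Spec_done_moving (mem_map : List String) (c : Int) (out : Bool) : Prop := out = done_moving_alt mem_map c
instance (mem_map : List String) (c : Int) (out : Bool) : Decidable (Spec_done_moving mem_map c out) := by unfold Spec_done_moving; infer_instance

-- ===== CLAIM (what is proved, stated in full; the proofs are below) =====
def Claim_equal_done_moving : Prop := ∀ (mem_map : List String) (c : Int), Dom_done_moving mem_map c → Pre_done_moving mem_map c → Spec_done_moving mem_map c (done_moving mem_map c)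

-- ===== LEMMAS AND PROOFS =====

-- "everything from the first '.' onward is '.'": the common value of both sides
def okA (l : List String) (found : Bool) : Bool :=
  match l with
  | [] => true
  | x :: xs =>
    if x == "." && !found then okA xs true
    else if found && !(x == ".") then false
    else okA xs found

theorem okA_true (l : List String) : okA l true = l.all (fun x => x == ".") := by
  induction l with
  | nil => rfl
  | cons x xs ih =>
    by_cases h : x == "."
    · simp [okA, h, List.all_cons, ih]
    · simp [okA, h, List.all_cons]

theorem loop_eq_okA (l : List String) : ∀ (n : Nat) (c : Int), 0 ≤ c → (l.length : Int) - c ≤ n →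
    ∀ found, doneMovingLoop l (PySem.List.pyRange c (l.length : Int) 1) found = okA (l.drop c.toNat) found := by
  intro n
  induction n with
  | zero =>
    intro c hc hle found
    rw [PySem.List.pyRange_one_eq_nil (by omega), List.drop_eq_nil_of_le (by omega)]
    rfl
  | succ n ih =>
    intro c hc hle found
    by_cases h : c < (l.length : Int)
    · rw [PySem.List.pyRange_one_cons h]
      have hlt : c.toNat < l.length := by omega
      have hdrop : l.drop c.toNat = l[c.toNat] :: l.drop (c.toNat + 1) :=
        (List.getElem_cons_drop hlt).symm
      have hget := PySem.List.pyGet?_eq_some_getElem l hc h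
      have ihx := ih (c + 1) (by omega) (by omega)
      rw [show (c + 1).toNat = c.toNat + 1 by omega] at ihx
      by_cases h1 : l[c.toNat] == "." <;> cases found <;>
        · conv_lhs => rw [doneMovingLoop]
          rw [hdrop]
          simp [hget, okA, h1, ihx]
    · rw [PySem.List.pyRange_one_eq_nil (by omega), List.drop_eq_nil_of_le (by omega)]
      rfl

theorem alt_core_eq_okA (sub : List String) : doneAltTail sub = okA sub false := by
  induction sub with
  | nil => rfl
  | cons x xs ih =>
    by_cases h : x == "."
    · have hx : x = "." := by simpa using h
      subst hx
      unfold doneAltTail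
      rw [PySem.List.index?_cons_self]
      simp [okA, okA_true, PySem.List.slice_none_none]
    · have hne : x ≠ "." := by simpa using h
      unfold doneAltTail at ih ⊢
      rw [PySem.List.index?_cons_of_ne xs hne]
      have hcont : (x :: xs).contains "." = xs.contains "." := by
        simp only [List.contains_cons]
        cases hx2 : xs.contains "." <;> simp
        · intro e; exact absurd e.symm hne
      rw [hcont]
      have hok : okA (x :: xs) false = okA xs false := by
        simp [okA, h]
      rw [hok, ← ih]
      cases hidx : PySem.List.index? xs "." with
      | none =>
        have hnm : ("." : String) ∉ xs := (PySem.List.index?_eq_none_iff xs ".").mp hidx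
        have hcf : xs.contains "." = false := by simpa using hnm
        simp [hcf]
      | some k =>
        have hmem : ("." : String) ∈ xs := by
          have hs : (PySem.List.index? xs ".").isSome := by rw [hidx]; rfl
          exact (PySem.List.index?_isSome_iff xs ".").mp hs
        have hcont2 : xs.contains "." = true := by simpa using hmem
        simp only [hcont2, Bool.not_true, Bool.false_eq_true, if_false, Option.map_some]
        rw [PySem.List.slice_from_natCast (x :: xs) (k + 1), PySem.List.slice_from_natCast xs k]
        simp [List.drop_succ_cons]

theorem done_moving_eq (mem_map : List String) (c : Int) (hc : 0 ≤ c) :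
    done_moving mem_map c = done_moving_alt mem_map c := by
  unfold done_moving done_moving_alt
  rw [PySem.List.slice_from mem_map hc, alt_core_eq_okA,
    loop_eq_okA mem_map ((mem_map.length : Int) - c).toNat c hc (by omega) false]

-- ===== VERDICT (by name: the statement is the Claim_ definition above) =====
theorem done_moving_spec : Claim_equal_done_moving := by
  intro mem_map c _ hpre
  unfold Spec_done_moving
  exact done_moving_eq mem_map c hpre
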